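-- pv_equiv track=rewrite | github.com/awslabs/nki-autotune | nkigym/src/nkigym/kernel_ir/rewrites/compute_skipping.py | _rebuild_edges_after_drop
-- ===== SOURCE A (Python) =====
-- def _rebuild_edges_after_drop(
--     edges: list[tuple[int, int, str, str]], dropped: set[int], redirect: dict[str, str]
-- ) -> list[tuple[int, int, str, str]]:
--     """Renumber indices past the dropped ops; skip edges touching them.
--
--     Consumers of a redirected tensor now read the redirect target;
--     those edges are dropped here since producers stay in place.
--     """
--     index_map: dict[int, int] = {}
--     next_new = 0
--     for old in range(max(edges, key=lambda e: max(e[0], e[1]))[1] + 1 if edges else 0):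
--         if old in dropped:
--             continue
--         index_map[old] = next_new
--         next_new += 1
--     new_edges: list[tuple[int, int, str, str]] = []
--     for src, dst, tensor, role in edges:
--         if src in dropped or dst in dropped:
--             continue
--         if tensor in redirect:
--             continue
--         new_edges.append((index_map[src], index_map[dst], tensor, role))
--     return new_edges
-- ===== SOURCE B (Python) =====
-- def _bisect_left(a, x):
--     """Standard bisect_left (hand-written: module imports nothing)."""
--     lo, hi = 0, len(a)
--     while lo < hi:
--         mid = (lo + hi) // 2
--         if a[mid] < x:
--             lo = mid + 1
--         else:
--             hi = mid
--     return lo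
--
--
-- def _rebuild_edges_after_drop(
--     edges: list[tuple[int, int, str, str]], dropped: set[int], redirect: dict[str, str]
-- ) -> list[tuple[int, int, str, str]]:
--     """Renumber indices past the dropped ops; skip edges touching them.
--
--     Alternative algorithm: instead of enumerating every index up to the
--     maximum, sort the (nonnegative) dropped indices once and renumber each
--     endpoint by binary search: new = old - (# dropped indices below old).
--     """
--     ds = sorted(d for d in dropped if d >= 0)
--     return [
--         (s - _bisect_left(ds, s), d - _bisect_left(ds, d), tensor, role)
--         for s, d, tensor, role in edges
--         if s not in dropped and d not in dropped and tensor not in redirect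
--     ]
-- ===== Notes on version B (the rewrite author's own statement) =====
-- stated objective: alternative
-- what changed: Replaces A's dense renumbering pass over every index in range(maxIndex+1) (building an index_map dict) with one sort of the dropped indices plus a binary search per kept endpoint (new = old - bisect_left(sorted_dropped, old)).
import Mathlib
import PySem

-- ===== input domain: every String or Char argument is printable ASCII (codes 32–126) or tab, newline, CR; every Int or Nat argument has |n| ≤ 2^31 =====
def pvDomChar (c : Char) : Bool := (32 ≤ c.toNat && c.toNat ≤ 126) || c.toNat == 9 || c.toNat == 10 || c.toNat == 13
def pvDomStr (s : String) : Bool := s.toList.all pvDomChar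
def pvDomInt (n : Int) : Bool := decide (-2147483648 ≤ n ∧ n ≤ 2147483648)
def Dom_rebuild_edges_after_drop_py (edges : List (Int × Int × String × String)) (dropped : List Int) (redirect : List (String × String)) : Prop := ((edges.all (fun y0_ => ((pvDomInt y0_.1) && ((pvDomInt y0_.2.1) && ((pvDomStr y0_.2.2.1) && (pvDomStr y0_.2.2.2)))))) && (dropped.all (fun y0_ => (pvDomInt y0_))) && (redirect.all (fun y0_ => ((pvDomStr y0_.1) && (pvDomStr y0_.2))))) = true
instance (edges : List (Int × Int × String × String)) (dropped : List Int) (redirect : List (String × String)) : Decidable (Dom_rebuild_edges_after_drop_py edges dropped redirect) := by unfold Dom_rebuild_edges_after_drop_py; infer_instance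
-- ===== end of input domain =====

-- B renumbers via binary search over the sorted dropped indices instead of A's dense
-- index_map pass over range(maxIndex+1): an alternative algorithm that needs no index_map.


-- ===== PORT A =====
-- 'max(edges, key=lambda e: max(e[0], e[1]))[1] + 1 if edges else 0'
def pvBound (edges : List (Int × Int × String × String)) : Int :=
  match PySem.List.max? edges (fun e => max e.1 e.2.1) with
  | some m => m.2.1 + 1
  | none => 0

def rebuild_edges_after_drop_py (edges : List (Int × Int × String × String)) (dropped : List Int) (redirect : List (String × String)) : List (Int × Int × String × String) :=
  -- first loop: build index_map (and next_new) over range(bound)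
  let st := (PySem.List.pyRange 0 (pvBound edges) 1).foldl
    (fun (st : PySem.Dict Int Int × Int) old =>
      if PySem.Set.contains dropped old then st
      else (st.1.insert old st.2, st.2 + 1))
    (PySem.Dict.empty, 0)
  let index_map := st.1
  -- second loop: filter and renumber; Python raises KeyError where index_map has no key —
  -- getD 0 is total, those inputs are excluded by Pre_
  edges.foldl
    (fun acc e =>
      if PySem.Set.contains dropped e.1 || PySem.Set.contains dropped e.2.1 then acc
      else if (PySem.Dict.mk redirect).contains e.2.2.1 then acc
      else acc ++ [(index_map.getD e.1 0, index_map.getD e.2.1 0, e.2.2.1, e.2.2.2)])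
    []

-- ===== PORT B =====
def rebuild_edges_after_drop_py_alt (edges : List (Int × Int × String × String)) (dropped : List Int) (redirect : List (String × String)) : List (Int × Int × String × String) :=
  -- ds = sorted(d for d in dropped if d >= 0); _bisect_left is PySem.List.bisectLeft
  let ds := PySem.List.sorted (dropped.filter (fun d => decide (0 ≤ d))) (fun x => x) false
  let ren := fun (i : Int) => i - (PySem.List.bisectLeft ds i : Int)
  edges.filterMap (fun e =>
    if !PySem.Set.contains dropped e.1 && !PySem.Set.contains dropped e.2.1
        && !(PySem.Dict.mk redirect).contains e.2.2.1
    then some (ren e.1, ren e.2.1, e.2.2.1, e.2.2.2)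
    else none)

-- ===== PRECONDITION & SPEC =====
-- Pre_ excludes exactly the inputs where A raises KeyError: a kept edge (endpoints not
-- dropped, tensor not redirected) with an endpoint outside range(bound), where bound is
-- the quirky 'e[1]+1 of the first edge maximizing max(e[0],e[1])'.  The Nodup conjunct
-- only restates that 'dropped' is a Python set (distinct elements), excluding no Python input.
def Pre_rebuild_edges_after_drop_py (edges : List (Int × Int × String × String)) (dropped : List Int) (redirect : List (String × String)) : Prop :=
  dropped.Nodup ∧
  ∀ e ∈ edges,
    (e.1 ∉ dropped ∧ e.2.1 ∉ dropped ∧ e.2.2.1 ∉ redirect.map Prod.fst) →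
    (0 ≤ e.1 ∧ e.1 < pvBound edges ∧ 0 ≤ e.2.1 ∧ e.2.1 < pvBound edges)
instance (edges : List (Int × Int × String × String)) (dropped : List Int) (redirect : List (String × String)) : Decidable (Pre_rebuild_edges_after_drop_py edges dropped redirect) := by unfold Pre_rebuild_edges_after_drop_py; infer_instance

def pvWitness_rebuild_edges_after_drop_py : (List (Int × Int × String × String)) × List Int × (List (String × String)) :=
  ([(0, 2, "t", "r"), (1, 2, "u", "x")], [1], [("u", "v")])

def Spec_rebuild_edges_after_drop_py (edges : List (Int × Int × String × String)) (dropped : List Int) (redirect : List (String × String)) (out : List (Int × Int × String × String)) : Prop := out = rebuild_edges_after_drop_py_alt edges dropped redirect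
instance (edges : List (Int × Int × String × String)) (dropped : List Int) (redirect : List (String × String)) (out : List (Int × Int × String × String)) : Decidable (Spec_rebuild_edges_after_drop_py edges dropped redirect out) := by unfold Spec_rebuild_edges_after_drop_py; infer_instance

-- ===== CLAIM (what is proved, stated in full; the proofs are below) =====
def Claim_equal_rebuild_edges_after_drop_py : Prop := ∀ (edges : List (Int × Int × String × String)) (dropped : List Int) (redirect : List (String × String)), Dom_rebuild_edges_after_drop_py edges dropped redirect → Pre_rebuild_edges_after_drop_py edges dropped redirect → Spec_rebuild_edges_after_drop_py edges dropped redirect (rebuild_edges_after_drop_py edges dropped redirect)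

-- ===== LEMMAS AND PROOFS =====

-- countP of a ≤-sorted list below x = bisectLeft
theorem pv_bisect_countP (xs : List Int) (x : Int)
    (hp : List.Pairwise (fun a b => a ≤ b) xs) :
    xs.countP (fun d => decide (d < x)) = PySem.List.bisectLeft xs x := by
  obtain ⟨hle, hlt, hge⟩ := PySem.List.bisectLeft_spec xs x hp
  set k := PySem.List.bisectLeft xs x with hk
  have hsplit : xs = xs.take k ++ xs.drop k := (List.take_append_drop k xs).symm
  rw [hsplit, List.countP_append]
  have h1 : (xs.take k).countP (fun d => decide (d < x)) = (xs.take k).length := by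
    rw [List.countP_eq_length]
    intro a ha
    obtain ⟨j, hj, rfl⟩ := List.mem_iff_getElem.mp ha
    have hjk : j < k := lt_of_lt_of_le hj (by simp)
    have hjlen : j < xs.length := by simp [List.length_take] at hj; omega
    have := hlt j hjlen hjk
    simpa [List.getElem_take] using this
  have h2 : (xs.drop k).countP (fun d => decide (d < x)) = 0 := by
    rw [List.countP_eq_zero]
    intro a ha
    obtain ⟨j, hj, rfl⟩ := List.mem_iff_getElem.mp ha
    have hjlen : k + j < xs.length := by simp [List.length_drop] at hj; omega
    have := hge (k + j) hjlen (by omega)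
    simp [List.getElem_drop]
    omega
  rw [h1, h2, List.length_take]
  omega

theorem pv_ren_eq (dropped : List Int) (i : Int) :
    (PySem.List.bisectLeft
      (PySem.List.sorted (dropped.filter (fun d => decide (0 ≤ d))) (fun x => x) false) i : Int)
    = dropped.countP (fun d => decide (0 ≤ d) && decide (d < i)) := by
  set ds := PySem.List.sorted (dropped.filter (fun d => decide (0 ≤ d))) (fun x => x) false with hds
  have hp : List.Pairwise (fun a b => a ≤ b) ds := by
    have := PySem.List.sorted_pairwise (dropped.filter (fun d => decide (0 ≤ d))) (fun x => x)
    simpa using this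
  have h1 := pv_bisect_countP ds i hp
  have h2 : ds.countP (fun d => decide (d < i))
      = (dropped.filter (fun d => decide (0 ≤ d))).countP (fun d => decide (d < i)) :=
    (PySem.List.sorted_perm _ _ _).countP_eq _
  rw [← h1, h2, List.countP_filter]
  norm_cast
  exact List.countP_congr (fun d _ => by simp [Bool.and_comm])

-- countP over [0,n+1) splits off the count of n
theorem pv_countP_split (l : List Int) (n : Int) (hn : 0 ≤ n) :
    l.countP (fun d => decide (0 ≤ d) && decide (d < n + 1))
    = l.countP (fun d => decide (0 ≤ d) && decide (d < n)) + l.count n := by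
  induction l with
  | nil => simp
  | cons a t ih =>
    simp only [List.countP_cons, List.count_cons, ih]
    by_cases ha : a = n
    · subst ha; simp [hn]; omega
    · by_cases h0 : 0 ≤ a
      · by_cases h1 : a < n
        · simp [h0, h1, ha, show a < n + 1 by omega]; omega
        · simp [h0, h1, ha, show ¬ a < n + 1 by omega]
      · simp [h0, ha]

theorem pv_inv (dropped : List Int) (hnd : dropped.Nodup) (n : Nat) :
    ((PySem.List.pyRange 0 (n : Int) 1).foldl
      (fun (st : PySem.Dict Int Int × Int) old =>
        if PySem.Set.contains dropped old then st
        else (st.1.insert old st.2, st.2 + 1))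
      (PySem.Dict.empty, 0)).2
      = (n : Int) - dropped.countP (fun d => decide (0 ≤ d) && decide (d < (n : Int)))
    ∧ ∀ i : Int, 0 ≤ i → i < (n : Int) → i ∉ dropped →
      ((PySem.List.pyRange 0 (n : Int) 1).foldl
        (fun (st : PySem.Dict Int Int × Int) old =>
          if PySem.Set.contains dropped old then st
          else (st.1.insert old st.2, st.2 + 1))
        (PySem.Dict.empty, 0)).1.getD i 0
        = i - dropped.countP (fun d => decide (0 ≤ d) && decide (d < i)) := by
  induction n with
  | zero =>
    constructor
    · rw [PySem.List.pyRange_one_eq_nil (by norm_num)]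
      simp only [List.foldl_nil]
      rw [List.countP_eq_zero.mpr (by intro a _; simp)]
      simp
    · intro i h0 h1 _; omega
  | succ n ih =>
    have hstep : PySem.List.pyRange 0 ((n + 1 : Nat) : Int) 1
        = PySem.List.pyRange 0 (n : Int) 1 ++ [(n : Int)] := by
      push_cast
      exact PySem.List.pyRange_one_succ_right (by positivity)
    have hcnt := pv_countP_split dropped (n : Int) (by positivity)
    obtain ⟨ih1, ih2⟩ := ih
    rw [hstep, List.foldl_append]
    set st := (PySem.List.pyRange 0 (n : Int) 1).foldl
      (fun (st : PySem.Dict Int Int × Int) old =>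
        if PySem.Set.contains dropped old then st
        else (st.1.insert old st.2, st.2 + 1))
      (PySem.Dict.empty, 0) with hst
    by_cases hmem : (n : Int) ∈ dropped
    · have hc : PySem.Set.contains dropped ((n : Int)) = true :=
        (PySem.Set.contains_iff dropped _).mpr hmem
      have hcount1 : dropped.count ((n : Int)) = 1 := by
        have h1 := (List.nodup_iff_count_le_one.mp hnd) ((n : Int))
        have h2 := List.count_pos_iff.mpr hmem
        omega
      simp only [List.foldl_cons, List.foldl_nil, hc, if_true]
      constructor
      · rw [ih1]; push_cast; rw [hcnt, hcount1]; push_cast; ring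
      · intro i h0 h1 hi
        have : i ≠ (n : Int) := fun h => hi (h ▸ hmem)
        exact ih2 i h0 (by omega) hi
    · have hc : PySem.Set.contains dropped ((n : Int)) = false := by
        rw [← Bool.not_eq_true]
        intro h
        exact hmem ((PySem.Set.contains_iff dropped _).mp h)
      have hcount0 : dropped.count ((n : Int)) = 0 := List.count_eq_zero.mpr hmem
      simp only [List.foldl_cons, List.foldl_nil, hc, Bool.false_eq_true, if_false]
      constructor
      · simp only [ih1]; push_cast; rw [hcnt, hcount0]; push_cast; ring
      · intro i h0 h1 hi
        by_cases hin : i = (n : Int)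
        · subst hin
          rw [PySem.Dict.getD_insert_self, ih1]
        · rw [PySem.Dict.getD_insert_of_ne _ _ _ hin]
          exact ih2 i h0 (by omega) hi

-- append-if loop with two 'continue' guards = filter-then-map
theorem pv_if3 {A B : Type} (c1 c2 : A → Bool) (f : A → B) (l : List A) :
    l.foldl (fun acc e => if c1 e then acc else if c2 e then acc else acc ++ [f e]) []
    = (l.filter (fun e => !c1 e && !c2 e)).map f := by
  have h : (fun (acc : List B) e => if c1 e then acc else if c2 e then acc else acc ++ [f e])
      = fun acc e => if (!c1 e && !c2 e) then acc ++ [f e] else acc := by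
    funext acc e
    cases h1 : c1 e <;> cases h2 : c2 e <;> simp
  rw [h, PySem.List.foldl_append_if]
  simp

-- guarded-comprehension = filter-then-map
theorem pv_filterMap_if {A B : Type} (p : A → Bool) (g : A → B) (l : List A) :
    l.filterMap (fun e => if p e then some (g e) else none) = (l.filter p).map g := by
  induction l with
  | nil => simp
  | cons a t ih => cases h : p a <;> simp [h, ih]

-- ===== VERDICT (by name: the statement is the Claim_ definition above) =====
theorem rebuild_edges_after_drop_py_spec : Claim_equal_rebuild_edges_after_drop_py := by
  intro edges dropped redirect _ hpre
  obtain ⟨hnd, hbounds⟩ := hpre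
  unfold Spec_rebuild_edges_after_drop_py rebuild_edges_after_drop_py rebuild_edges_after_drop_py_alt
  dsimp only
  set im := ((PySem.List.pyRange 0 (pvBound edges) 1).foldl
    (fun (st : PySem.Dict Int Int × Int) old =>
      if PySem.Set.contains dropped old then st
      else (st.1.insert old st.2, st.2 + 1))
    (PySem.Dict.empty, 0)).1 with him
  rw [pv_if3 (fun e => PySem.Set.contains dropped e.1 || PySem.Set.contains dropped e.2.1)
        (fun e => (PySem.Dict.mk redirect).contains e.2.2.1)
        (fun e => (im.getD e.1 0, im.getD e.2.1 0, e.2.2.1, e.2.2.2)) edges,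
      pv_filterMap_if
        (fun e => !PySem.Set.contains dropped e.1 && !PySem.Set.contains dropped e.2.1
          && !(PySem.Dict.mk redirect).contains e.2.2.1)
        (fun e => (e.1 - (PySem.List.bisectLeft (PySem.List.sorted (dropped.filter (fun d => decide (0 ≤ d))) (fun x => x) false) e.1 : Int),
                   e.2.1 - (PySem.List.bisectLeft (PySem.List.sorted (dropped.filter (fun d => decide (0 ≤ d))) (fun x => x) false) e.2.1 : Int),
                   e.2.2.1, e.2.2.2)) edges]
  have hpp : (fun (e : Int × Int × String × String) =>
        !(PySem.Set.contains dropped e.1 || PySem.Set.contains dropped e.2.1)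
          && !(PySem.Dict.mk redirect).contains e.2.2.1)
      = fun e => !PySem.Set.contains dropped e.1 && !PySem.Set.contains dropped e.2.1
          && !(PySem.Dict.mk redirect).contains e.2.2.1 := by
    funext e
    simp [Bool.not_or, Bool.and_assoc]
  rw [hpp]
  apply List.map_congr_left
  intro e he
  rw [List.mem_filter] at he
  obtain ⟨hmem, hcond⟩ := he
  simp at hcond
  obtain ⟨⟨hn1, hn2⟩, hred⟩ := hcond
  have hn3 : e.2.2.1 ∉ redirect.map Prod.fst := by
    intro h
    obtain ⟨p, hp, hpe⟩ := List.mem_map.mp h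
    exact hred p.1 p.2 hp hpe
  obtain ⟨hb1, hb2, hb3, hb4⟩ := hbounds e hmem ⟨hn1, hn2, hn3⟩
  have hbpos : 0 < pvBound edges := lt_of_le_of_lt hb1 hb2
  have hbn : pvBound edges = ((pvBound edges).toNat : Int) := (Int.toNat_of_nonneg (le_of_lt hbpos)).symm
  rw [him, hbn]
  obtain ⟨_, hmap⟩ := pv_inv dropped hnd (pvBound edges).toNat
  rw [hmap e.1 hb1 (by omega) hn1, hmap e.2.1 hb3 (by omega) hn2,
      pv_ren_eq dropped e.1, pv_ren_eq dropped e.2.1]
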